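-- pv_equiv track=rewrite | github.com/a101459/ATP2022 | TPC6/aula6.py | distAno
-- ===== SOURCE A (Python) =====
-- def distAno(obras):
--     dici = {}
--     for _, _, ano, *_ in obras:
--         if ano in dici.keys():
--             dici[ano] = dici[ano] + 1
--         else:
--             dici[ano] = 1
--     return dici
-- ===== SOURCE B (Python) =====
-- def distAno(obras):
--     anos = [ano for _, _, ano, *_ in obras]
--     return {ano: anos.count(ano) for ano in dict.fromkeys(anos)}
-- ===== Notes on version B (the rewrite author's own statement) =====
-- stated objective: alternative
-- what changed: B first extracts the list of years, then builds the result in one dict comprehension over the ordered-deduplicated years using list.count, instead of A's single-pass hash accumulation with a per-key running counter.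
import Mathlib
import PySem

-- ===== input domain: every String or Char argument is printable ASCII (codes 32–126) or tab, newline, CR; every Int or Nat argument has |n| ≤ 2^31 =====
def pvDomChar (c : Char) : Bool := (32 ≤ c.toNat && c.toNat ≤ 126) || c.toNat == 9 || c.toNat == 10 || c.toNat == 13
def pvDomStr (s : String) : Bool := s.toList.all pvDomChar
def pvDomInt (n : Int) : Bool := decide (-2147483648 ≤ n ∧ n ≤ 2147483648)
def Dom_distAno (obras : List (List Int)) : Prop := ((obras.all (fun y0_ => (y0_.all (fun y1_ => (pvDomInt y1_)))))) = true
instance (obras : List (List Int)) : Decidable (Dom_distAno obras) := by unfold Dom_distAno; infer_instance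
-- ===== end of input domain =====

-- B replaces A's single-pass hash accumulation by a dict comprehension over the
-- ordered-deduplicated year list using list.count (alternative decomposition, not faster).

-- the `_, _, ano, *_` unpacking: ano = o[2]; exact whenever o has ≥ 3 fields
-- (shorter records make Python raise ValueError — excluded by Pre_distAno)
def pvAno (o : List Int) : Int := (PySem.List.pyGet? o 2).getD 0

-- ===== PORT A =====
def distAno (obras : List (List Int)) : List (Int × Int) :=
  (obras.foldl
    (fun dici o =>
      if dici.contains (pvAno o) then dici.insert (pvAno o) (dici.getD (pvAno o) 0 + 1)
      else dici.insert (pvAno o) (1 : Int))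
    PySem.Dict.empty).items

-- ===== PORT B =====
def distAno_alt (obras : List (List Int)) : List (Int × Int) :=
  let anos := obras.map pvAno
  ((PySem.List.dedup anos).foldl
    (fun dici ano => dici.insert ano ((anos.count ano : Int)))
    PySem.Dict.empty).items

-- ===== PRECONDITION & SPEC =====
-- Pre_ excludes records with fewer than 3 fields, on which Python's `_, _, ano, *_`
-- unpacking raises ValueError (in A and in B alike).
def Pre_distAno (obras : List (List Int)) : Prop := ∀ o ∈ obras, 3 ≤ o.length
instance (obras : List (List Int)) : Decidable (Pre_distAno obras) := by unfold Pre_distAno; infer_instance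

def pvWitness_distAno : List (List Int) := [[1, 2, 2020], [3, 4, 2020, 5], [0, 0, 1999]]

def Spec_distAno (obras : List (List Int)) (out : List (Int × Int)) : Prop := out = distAno_alt obras
instance (obras : List (List Int)) (out : List (Int × Int)) : Decidable (Spec_distAno obras out) := by unfold Spec_distAno; infer_instance

-- ===== CLAIM (what is proved, stated in full; the proofs are below) =====
def Claim_equal_distAno : Prop := ∀ (obras : List (List Int)), Dom_distAno obras → Pre_distAno obras → Spec_distAno obras (distAno obras)

-- ===== LEMMAS AND PROOFS =====

-- a lookup of an absent key returns the default
lemma getD_of_not_contains (d : PySem.Dict Int Int) (a : Int)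
    (h : d.contains a = false) : d.getD a 0 = 0 := by
  simp only [PySem.Dict.contains, List.any_eq_false] at h
  simp [PySem.Dict.getD, PySem.Dict.get?, List.find?_eq_none.mpr h]

-- folding `d[k] = f k` over pairwise-distinct fresh keys appends the mapped pairs
lemma foldl_insert_map (f : Int → Int) :
    ∀ (ks : List Int) (d : PySem.Dict Int Int), ks.Nodup →
      (∀ k ∈ ks, d.contains k = false) →
      (ks.foldl (fun dici a => dici.insert a (f a)) d).items
        = d.items ++ ks.map (fun k => (k, f k)) := by
  intro ks
  induction ks with
  | nil => intro d _ _; simp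
  | cons x t ih =>
    intro d hnd hfresh
    have hx : d.contains x = false := hfresh x (by simp)
    have step : (d.insert x (f x)).items = d.items ++ [(x, f x)] := by
      simp [PySem.Dict.insert, hx]
    have hfresh' : ∀ k ∈ t, (d.insert x (f x)).contains k = false := by
      intro k hk
      have hne : (x == k) = false := by
        have : x ≠ k := by rintro rfl; exact (List.nodup_cons.mp hnd).1 hk
        simp [this]
      have hk' : d.contains k = false := hfresh k (List.mem_cons_of_mem _ hk)
      simp only [PySem.Dict.contains] at hk' ⊢
      simp [step, hk', hne]
    calc ((x :: t).foldl (fun dici a => dici.insert a (f a)) d).items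
        = (t.foldl (fun dici a => dici.insert a (f a)) (d.insert x (f x))).items := by
          simp [List.foldl_cons]
      _ = (d.insert x (f x)).items ++ t.map (fun k => (k, f k)) :=
          ih (d.insert x (f x)) (List.nodup_cons.mp hnd).2 hfresh'
      _ = d.items ++ (x :: t).map (fun k => (k, f k)) := by simp [step]

-- A's loop body, with the branch on membership resolved, is the counter step
lemma body_eq_counter_step (d : PySem.Dict Int Int) (a : Int) :
    (if d.contains a then d.insert a (d.getD a 0 + 1) else d.insert a (1 : Int))
      = d.insert a (d.getD a 0 + 1) := by
  by_cases h : d.contains a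
  · simp [h]
  · simp [h, getD_of_not_contains d a (by simpa using h)]

-- ===== VERDICT (by name: the statement is the Claim_ definition above) =====
theorem distAno_spec : Claim_equal_distAno := by
  intro obras _ _
  unfold Spec_distAno distAno distAno_alt
  -- A's loop over records is the counter loop over the extracted year list
  rw [← List.foldl_map (f := pvAno)
        (g := fun (dici : PySem.Dict Int Int) a =>
          if dici.contains a then dici.insert a (dici.getD a 0 + 1)
          else dici.insert a (1 : Int))]
  rw [funext (fun d => funext (fun a => body_eq_counter_step d a)),
      PySem.Dict.foldl_insert_getD_add_one_eq_counter, PySem.Dict.items_counter]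
  -- B's loop over the deduplicated years appends exactly those pairs
  have hB := foldl_insert_map (fun k => ((obras.map pvAno).count k : Int))
      (PySem.List.dedup (obras.map pvAno)) PySem.Dict.empty
      (by simp [PySem.List.dedup, PySem.Set.nodup_ofList])
      (by intro k _; simp [PySem.Dict.contains, PySem.Dict.empty])
  simp only [PySem.List.dedup, PySem.Dict.empty, List.nil_append] at hB
  exact hB.symm
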